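-- pv_equiv track=rewrite | github.com/ryongseong/Algorithm | 프로그래머스/4/60060. 가사 검색/가사 검색.py | solution
-- ===== SOURCE A (Python) =====
-- def solution(words, queries):
--     head, head_rev = {}, {}
--     wc = []
--     answer=[]
--
--     def add(head,word):
--         node = head
--         for w in word:
--             if w not in node:
--                 node[w]={}
--             node= node[w]
--             if 'len' not in node:
--                 node['len'] = [len_word]
--             else:
--                 node['len'].append(len_word)
--         node['end']=True
--
--
--     def search(head, querie):
--         count=0
--         node = head
--         for q in querie:
--             if q=='?':
--                 return node['len'].count(len_qu)
--             elif q not in node: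
--                 break
--             node = node[q]
--         return count
--
--
--
--     for word in words:
--         len_word = len(word)
--         add(head,word)
--         add(head_rev,word[::-1])
--         wc.append(len_word)
--
--
--     for querie in queries:
--         len_qu = len(querie)
--         if querie[0]=='?':
--             if querie[-1]=='?':
--                 answer.append(wc.count(len_qu))
--             else:
--                 answer.append(search(head_rev, querie[::-1]))
--         else:
--             answer.append(search(head, querie))
--     return answer
-- ===== SOURCE B (Python) =====
-- def _before(s):
--     # prefix of s up to (not including) the first '?'
--     p = []
--     for ch in s:
--         if ch == '?':
--             break
--         p.append(ch)
--     return p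
--
--
-- def solution(words, queries):
--     answer = []
--     for q in queries:
--         n = len(q)
--         if q[0] == '?':
--             if q[-1] == '?':
--                 c = sum(1 for w in words if len(w) == n)
--             else:
--                 p = _before(list(reversed(q)))
--                 c = sum(1 for w in words
--                         if len(w) == n and list(reversed(w))[:len(p)] == p)
--         elif '?' in q:
--             p = _before(list(q))
--             c = sum(1 for w in words if len(w) == n and list(w)[:len(p)] == p)
--         else:
--             c = 0
--         answer.append(c)
--     return answer
-- ===== Notes on version B (the rewrite author's own statement) =====
-- stated objective: simpler
-- what changed: A builds two character tries (forward and reversed) with a length list appended at every node plus a global length list, then walks them per query (counting in the node's length list); B drops the tries entirely and answers each query with a direct filtered count over the word list (same length and matching fixed prefix/suffix up to the first '?').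
import Mathlib
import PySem

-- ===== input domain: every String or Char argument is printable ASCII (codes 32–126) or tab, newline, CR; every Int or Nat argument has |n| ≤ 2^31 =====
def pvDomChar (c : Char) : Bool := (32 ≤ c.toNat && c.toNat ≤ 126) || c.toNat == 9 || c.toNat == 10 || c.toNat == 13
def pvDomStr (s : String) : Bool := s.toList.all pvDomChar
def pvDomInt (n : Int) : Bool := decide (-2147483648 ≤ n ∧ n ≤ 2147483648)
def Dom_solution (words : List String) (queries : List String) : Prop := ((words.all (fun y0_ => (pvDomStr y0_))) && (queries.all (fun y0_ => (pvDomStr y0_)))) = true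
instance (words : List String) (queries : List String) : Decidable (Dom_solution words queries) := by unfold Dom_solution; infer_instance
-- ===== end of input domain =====

-- B replaces A's hand-built pair of tries (length list at every node) by a direct per-query
-- filtered count over the word list — simpler, no auxiliary structure (measured faster in the
-- timing run: no per-node list building / counting); return value only.

-- ===== PORT A =====
-- A's trie node is a Python dict {char -> child dict, 'len' -> list, 'end' -> True};
-- ported as a mutual inductive: children as an insertion-ordered association list,
-- the 'len' entry as a List Int ([] = key absent; the lists are only appended to, never
-- emptied, so [] is exact for absence), the 'end' entry as a Bool.
mutual
inductive PTrie where
  | mk : PChildren → List Int → Bool → PTrie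
inductive PChildren where
  | nil : PChildren
  | cons : Char → PTrie → PChildren → PChildren
end

def PTrie.children : PTrie → PChildren
  | .mk ch _ _ => ch

def PTrie.lens : PTrie → List Int
  | .mk _ ls _ => ls

def PTrie.fin : PTrie → Bool
  | .mk _ _ e => e

def PTrie.empty : PTrie := .mk .nil [] false

def PChildren.lookup : PChildren → Char → Option PTrie
  | .nil, _ => none
  | .cons c t rest, d => if c = d then some t else rest.lookup d

-- dict write node[c] = t' : overwrite in place, append at the end if absent
def PChildren.set : PChildren → Char → PTrie → PChildren
  | .nil, d, t' => .cons d t' .nil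
  | .cons c t rest, d, t' => if c = d then .cons c t' rest else .cons c t (rest.set d t')

-- A's add(head, word): walk/create the path, appending len_word to each node's 'len' list,
-- mark 'end' at the last node
def pyAdd : PTrie → List Char → Int → PTrie
  | .mk ch ls _, [], _ => .mk ch ls true
  | .mk ch ls e, c :: rest, n =>
      let child := (ch.lookup c).getD PTrie.empty          -- if w not in node: node[w] = {}
      let child := PTrie.mk child.children (child.lens ++ [n]) child.fin
      .mk (ch.set c (pyAdd child rest n)) ls e

-- A's search(head, querie): at the first '?' return node['len'].count(len_qu);
-- a missing child breaks the loop and count = 0 is returned; a full walk also returns 0.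
-- (node['len'] at the root would be a KeyError in Python; both call sites pass a first
-- character ≠ '?', so that branch is never taken with node = root.)
def pySearch : PTrie → List Char → Int → Int
  | _, [], _ => 0
  | t, q :: rest, lq =>
      if q = '?' then ((PySem.List.count t.lens lq : Nat) : Int)
      else match t.children.lookup q with
        | none => 0
        | some t' => pySearch t' rest lq

def solution (words : List String) (queries : List String) : List Int :=
  let st := words.foldl (fun (st : PTrie × PTrie × List Int) w =>
      let lenWord : Int := PySem.Str.len w
      (pyAdd st.1 w.toList lenWord,
       pyAdd st.2.1 w.toList.reverse lenWord,    -- word[::-1]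
       st.2.2 ++ [lenWord]))
    (PTrie.empty, PTrie.empty, [])
  queries.foldl (fun answer q =>
    let lenQu : Int := PySem.Str.len q
    let cs := q.toList
    answer ++ [match cs with
      | [] => 0          -- querie[0] is an IndexError in Python; excluded by Pre_solution
      | c0 :: _ =>
        if c0 = '?' then
          if (PySem.List.pyGet? cs (-1)).getD ' ' = '?' then      -- querie[-1] (cs ≠ [] here)
            ((PySem.List.count st.2.2 lenQu : Nat) : Int)         -- wc.count(len_qu)
          else pySearch st.2.1 cs.reverse lenQu                   -- search(head_rev, querie[::-1])
        else pySearch st.1 cs lenQu]) []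

-- ===== PORT B =====
-- _before(s): the prefix of s up to (not including) the first '?'
def before : List Char → List Char
  | [] => []
  | c :: rest => if c = '?' then [] else c :: before rest

-- sum(1 for w in words if pred(w))
def countWords (words : List String) (pred : String → Bool) : Int :=
  words.foldl (fun acc w => if pred w then acc + 1 else acc) 0

def solution_alt (words : List String) (queries : List String) : List Int :=
  queries.foldl (fun answer q =>
    let n : Int := PySem.Str.len q
    let cs := q.toList
    answer ++ [match cs with
      | [] => 0          -- q[0] is an IndexError in Python; excluded by Pre_solution
      | c0 :: _ =>
        if c0 = '?' then
          if (PySem.List.pyGet? cs (-1)).getD ' ' = '?' then      -- q[-1] (cs ≠ [] here)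
            countWords words (fun w => PySem.Str.len w == n)
          else
            let p := before cs.reverse                            -- _before(list(reversed(q)))
            countWords words (fun w =>
              PySem.Str.len w == n && (w.toList.reverse.take p.length == p))
        else if cs.contains '?' then                              -- '?' in q (1-char needle: membership)
          let p := before cs
          countWords words (fun w =>
            PySem.Str.len w == n && (w.toList.take p.length == p))
        else 0]) []

-- ===== PRECONDITION & SPEC =====
-- Pre_ excludes only inputs on which A raises: an empty query string makes querie[0] an IndexError.
def Pre_solution (words : List String) (queries : List String) : Prop :=
  ∀ q ∈ queries, q ≠ ""
instance (words : List String) (queries : List String) : Decidable (Pre_solution words queries) := by unfold Pre_solution; infer_instance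

def pvWitness_solution : List String × List String :=
  (["frodo", "front", "frost", "frozen", "frame", "kakao"],
   ["fro??", "????o", "fr???", "fro???", "pro?", "?????"])

def Spec_solution (words : List String) (queries : List String) (out : List Int) : Prop := out = solution_alt words queries
instance (words : List String) (queries : List String) (out : List Int) : Decidable (Spec_solution words queries out) := by unfold Spec_solution; infer_instance

-- ===== CLAIM (what is proved, stated in full; the proofs are below) =====
def Claim_equal_solution : Prop := ∀ (words : List String) (queries : List String), Dom_solution words queries → Pre_solution words queries → Spec_solution words queries (solution words queries)

-- ===== LEMMAS AND PROOFS =====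

-- the 'len' lists reachable from t along a path p ([] when the path is missing)
def lensAt : PTrie → List Char → List Int
  | t, [] => t.lens
  | t, c :: p =>
      match t.children.lookup c with
      | none => []
      | some t' => lensAt t' p

@[simp] theorem children_mk (ch : PChildren) (ls : List Int) (e : Bool) :
    (PTrie.mk ch ls e).children = ch := rfl
@[simp] theorem lens_mk (ch : PChildren) (ls : List Int) (e : Bool) :
    (PTrie.mk ch ls e).lens = ls := rfl
@[simp] theorem fin_mk (ch : PChildren) (ls : List Int) (e : Bool) :
    (PTrie.mk ch ls e).fin = e := rfl

theorem lookup_set_self (ch : PChildren) (c : Char) (t' : PTrie) :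
    (ch.set c t').lookup c = some t' :=
  match ch with
  | .nil => by simp [PChildren.set, PChildren.lookup]
  | .cons d t rest => by
      by_cases h : d = c <;>
        simp [PChildren.set, PChildren.lookup, h, lookup_set_self rest c t']

theorem lookup_set_ne (ch : PChildren) (c d : Char) (t' : PTrie) (h : d ≠ c) :
    (ch.set c t').lookup d = ch.lookup d :=
  match ch with
  | .nil => by simp [PChildren.set, PChildren.lookup, Ne.symm h]
  | .cons e t rest => by
      by_cases he : e = c
      · subst he; simp [PChildren.set, PChildren.lookup, Ne.symm h]
      · simp [PChildren.set, PChildren.lookup, he, lookup_set_ne rest c d t' h]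

theorem lensAt_pyAdd (w : List Char) : ∀ (t : PTrie) (n : Int) (p : List Char),
    lensAt (pyAdd t w n) p = if p ≠ [] ∧ p <+: w then lensAt t p ++ [n] else lensAt t p := by
  induction w with
  | nil =>
      intro t n p
      cases t with
      | mk ch ls e =>
        cases p with
        | nil => simp [pyAdd, lensAt]
        | cons c p' => simp [pyAdd, lensAt]
  | cons d w' ih =>
      intro t n p
      cases t with
      | mk ch ls e =>
        cases p with
        | nil => simp [pyAdd, lensAt]
        | cons c p' =>
          by_cases hcd : c = d
          · subst hcd
            cases hlk : ch.lookup c with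
            | none =>
                simp only [pyAdd, lensAt, children_mk, lens_mk, hlk, Option.getD_none,
                  PTrie.empty, fin_mk, lookup_set_self, List.nil_append, ih, ne_eq,
                  List.cons_prefix_cons, true_and, reduceCtorEq, not_false_eq_true]
                cases p' with
                | nil => simp [lensAt]
                | cons c'' p'' =>
                    by_cases hp : (c'' :: p'') <+: w' <;>
                      simp [lensAt, PChildren.lookup, hp]
            | some tc =>
                cases tc with
                | mk ch2 ls2 e2 =>
                  simp only [pyAdd, lensAt, children_mk, lens_mk, hlk, Option.getD_some,
                    fin_mk, lookup_set_self, ih, ne_eq, List.cons_prefix_cons, true_and,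
                    reduceCtorEq, not_false_eq_true]
                  cases p' with
                  | nil => simp [lensAt]
                  | cons c'' p'' =>
                      by_cases hp : (c'' :: p'') <+: w' <;> simp [lensAt, hp]
          · have hnp : ¬ ((c :: p') <+: (d :: w')) := by
              simp [List.cons_prefix_cons, hcd]
            simp only [pyAdd, lensAt, children_mk,
              lookup_set_ne _ d c _ hcd, ne_eq, reduceCtorEq, not_false_eq_true, hnp,
              and_false, if_false]
theorem lensAt_empty (p : List Char) (hp : p ≠ []) : lensAt PTrie.empty p = [] := by
  cases p with
  | nil => exact absurd rfl hp
  | cons c p' => simp [lensAt, PTrie.empty, PTrie.children, PChildren.lookup]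

theorem lensAt_foldl {α : Type} (key : α → List Char) (val : α → Int) (l : List α) :
    ∀ (t : PTrie) (p : List Char), p ≠ [] →
    lensAt (l.foldl (fun t x => pyAdd t (key x) (val x)) t) p
      = lensAt t p ++ (l.filter (fun x => decide (p <+: key x))).map val := by
  induction l with
  | nil => intro t p _; simp
  | cons x l' ih =>
      intro t p hp
      simp only [List.foldl_cons]
      rw [ih _ p hp, lensAt_pyAdd]
      by_cases hpre : p <+: key x
      · simp [hp, hpre]
      · simp [hp, hpre]

theorem pySearch_eq (cs : List Char) : ∀ (t : PTrie) (lq : Int),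
    pySearch t cs lq
      = if '?' ∈ cs then ((List.count lq (lensAt t (before cs)) : Nat) : Int) else 0 := by
  induction cs with
  | nil => intro t lq; simp [pySearch]
  | cons c rest ih =>
      intro t lq
      by_cases hc : c = '?'
      · subst hc
        simp [pySearch, before, lensAt, PySem.List.count_eq]
      · cases hlk : t.children.lookup c with
        | none =>
            by_cases hm : '?' ∈ rest <;>
              simp [pySearch, before, lensAt, hc, hlk, hm, Ne.symm hc]
        | some t' =>
            by_cases hm : '?' ∈ rest <;>
              simp [pySearch, before, lensAt, hc, hlk, hm, ih, Ne.symm hc]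

-- the three building folds of A, separated
theorem build_split (words : List String) :
    words.foldl (fun (st : PTrie × PTrie × List Int) w =>
        (pyAdd st.1 w.toList (PySem.Str.len w),
         pyAdd st.2.1 w.toList.reverse (PySem.Str.len w),
         st.2.2 ++ [PySem.Str.len w])) (PTrie.empty, PTrie.empty, []) =
      (words.foldl (fun t w => pyAdd t w.toList (PySem.Str.len w)) PTrie.empty,
       words.foldl (fun t w => pyAdd t w.toList.reverse (PySem.Str.len w)) PTrie.empty,
       words.map (fun w => PySem.Str.len w)) := by
  rw [PySem.List.foldl_prod_mk (f := fun t w => pyAdd t w.toList (PySem.Str.len w))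
        (g := fun (s : PTrie × List Int) w =>
          (pyAdd s.1 w.toList.reverse (PySem.Str.len w), s.2 ++ [PySem.Str.len w])),
      PySem.List.foldl_prod_mk (f := fun t w => pyAdd t w.toList.reverse (PySem.Str.len w))
        (g := fun (s : List Int) w => s ++ [PySem.Str.len w]),
      PySem.List.foldl_append_singleton_eq_map]
  simp

-- count over the built trie = a filtered count over words (p ≠ [])
theorem trie_count (key : String → List Char) (words : List String) (p : List Char)
    (hp : p ≠ []) (lq : Int) :
    ((List.count lq (lensAt (words.foldl (fun t w => pyAdd t (key w) (PySem.Str.len w)) PTrie.empty) p) : Nat) : Int)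
      = ((words.countP (fun w => decide (p <+: key w) && (PySem.Str.len w == lq)) : Nat) : Int) := by
  rw [lensAt_foldl key (fun w => PySem.Str.len w) words PTrie.empty p hp,
      lensAt_empty p hp]
  simp only [List.nil_append, List.count_eq_countP, List.countP_map, List.countP_filter]
  congr 1
  apply List.countP_congr
  intro w _
  simp only [Function.comp_apply]
  constructor
  · intro h; simp_all
  · intro h; simp_all

theorem countWords_eq (words : List String) (pred : String → Bool) :
    countWords words pred = ((words.countP pred : Nat) : Int) := by
  unfold countWords
  rw [PySem.List.foldl_if_add_one]
  simp

-- prefix test written as 'take = p' (B) agrees with List.IsPrefix (A's characterisation)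
theorem take_eq_iff_prefix (p w : List Char) : (w.take p.length == p) = decide (p <+: w) := by
  by_cases h : p <+: w
  · simp [h, (List.prefix_iff_eq_take.mp h).symm]
  · simp only [h, decide_false, beq_eq_false_iff_ne]
    intro heq
    exact h (List.prefix_iff_eq_take.mpr heq.symm)

theorem before_ne_nil (c : Char) (rest : List Char) (hc : c ≠ '?') :
    before (c :: rest) ≠ [] := by
  simp [before, hc]

theorem mem_reverse_getLast (cs : List Char) (h : cs ≠ []) :
    (PySem.List.pyGet? cs (-1)).getD ' ' = cs.reverse.headI := by
  cases hrev : cs.reverse with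
  | nil => simp_all
  | cons c rest =>
      have : cs = (c :: rest).reverse := by rw [← hrev, List.reverse_reverse]
      subst this
      simp [PySem.List.pyGet?, PySem.List.pyIdx?]

-- per-query agreement of the two bodies
theorem per_query (words : List String) (q : String) (hq : q ≠ "") :
    (match q.toList with
      | [] => (0 : Int)
      | c0 :: _ =>
        if c0 = '?' then
          if (PySem.List.pyGet? q.toList (-1)).getD ' ' = '?' then
            ((PySem.List.count (words.map (fun w => PySem.Str.len w)) (PySem.Str.len q) : Nat) : Int)
          else pySearch (words.foldl (fun t w => pyAdd t w.toList.reverse (PySem.Str.len w)) PTrie.empty)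
            q.toList.reverse (PySem.Str.len q)
        else pySearch (words.foldl (fun t w => pyAdd t w.toList (PySem.Str.len w)) PTrie.empty)
          q.toList (PySem.Str.len q))
    = (match q.toList with
      | [] => (0 : Int)
      | c0 :: _ =>
        if c0 = '?' then
          if (PySem.List.pyGet? q.toList (-1)).getD ' ' = '?' then
            countWords words (fun w => PySem.Str.len w == PySem.Str.len q)
          else
            countWords words (fun w => PySem.Str.len w == PySem.Str.len q &&
              (w.toList.reverse.take (before q.toList.reverse).length == before q.toList.reverse))
        else if q.toList.contains '?' then
          countWords words (fun w => PySem.Str.len w == PySem.Str.len q &&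
            (w.toList.take (before q.toList).length == before q.toList))
        else 0) := by
  have hcs : q.toList ≠ [] := by simp_all
  cases hcs' : q.toList with
  | nil => exact absurd hcs' hcs
  | cons c0 rest =>
    by_cases hc0 : c0 = '?'
    · subst hc0
      by_cases hlast : (PySem.List.pyGet? ('?' :: rest) (-1)).getD ' ' = '?'
      · -- both ends '?': a length count
        simp only [hlast, if_true]
        rw [countWords_eq]
        simp [PySem.List.count_eq, List.count_eq_countP, List.countP_map, Function.comp_def]
      · -- leading '?': suffix search via the reversed trie
        simp only [hlast, if_false]
        rw [pySearch_eq]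
        have hmem : '?' ∈ ('?' :: rest).reverse := by simp
        rw [if_pos hmem]
        have hrev : ('?' :: rest).reverse ≠ [] := by simp
        have hne : before (('?' :: rest).reverse) ≠ [] := by
          cases hr : ('?' :: rest).reverse with
          | nil => exact absurd hr hrev
          | cons h t =>
              apply before_ne_nil
              have := mem_reverse_getLast ('?' :: rest) (by simp)
              rw [hr] at this
              simp only [List.headI] at this
              rw [← this]; exact hlast
        rw [trie_count (fun w => w.toList.reverse) words _ hne, countWords_eq]
        refine congrArg (fun k : Nat => (k : Int)) (List.countP_congr ?_)
        intro w _
        rw [take_eq_iff_prefix, Bool.and_comm]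
    · -- no leading '?': prefix search via the forward trie
      simp only [hc0, if_false]
      rw [pySearch_eq]
      by_cases hmem : '?' ∈ (c0 :: rest)
      · have hcont : (c0 :: rest).contains '?' = true := List.contains_iff_mem.mpr hmem
        rw [if_pos hmem, if_pos hcont]
        have hne : before (c0 :: rest) ≠ [] := before_ne_nil c0 rest hc0
        rw [trie_count (fun w => w.toList) words _ hne, countWords_eq]
        refine congrArg (fun k : Nat => (k : Int)) (List.countP_congr ?_)
        intro w _
        rw [take_eq_iff_prefix, Bool.and_comm]
      · have hcont : ¬ (c0 :: rest).contains '?' = true := by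
          simp [hmem]
        rw [if_neg hmem, if_neg hcont]

-- ===== VERDICT (by name: the statement is the Claim_ definition above) =====
theorem solution_spec : Claim_equal_solution := by
  intro words queries _ hpre
  unfold Spec_solution solution solution_alt
  simp only [build_split]
  rw [PySem.List.foldl_append_singleton_eq_map, PySem.List.foldl_append_singleton_eq_map]
  simp only [List.nil_append]
  apply List.map_congr_left
  intro q hq
  exact per_query words q (hpre q hq)
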